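-- pv_equiv track=rewrite | github.com/silixholdings-source/Cursor-OCRproduction | scripts/generate_diagnostic_report.py | categorize_failures_by_severity
-- ===== SOURCE A (Python) =====
-- from typing import Dict, List, Any
--
-- def categorize_failures_by_severity(failures: List[Dict[str, Any]]) -> Dict[str, List[Dict[str, Any]]]:
--     """Categorize failures by severity"""
--     categories = {
--         'critical': [],
--         'high': [],
--         'medium': [],
--         'low': []
--     }
--
--     for failure in failures:
--         severity = failure.get('severity', 'low')
--         if severity in categories:
--             categories[severity].append(failure)
--
--     return categories
-- ===== SOURCE B (Python) =====
-- from typing import Dict, List, Any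
--
-- def categorize_failures_by_severity(failures: List[Dict[str, Any]]) -> Dict[str, List[Dict[str, Any]]]:
--     """Categorize failures by severity (per-category filter passes)."""
--     return {
--         cat: [f for f in failures if f.get('severity', 'low') == cat]
--         for cat in ('critical', 'high', 'medium', 'low')
--     }
-- ===== Notes on version B (the rewrite author's own statement) =====
-- stated objective: simpler
-- what changed: Replaced the mutate-a-dict dispatch loop with a dict comprehension that builds each of the four fixed buckets by an order-preserving filter of the failures list.
import Mathlib
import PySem

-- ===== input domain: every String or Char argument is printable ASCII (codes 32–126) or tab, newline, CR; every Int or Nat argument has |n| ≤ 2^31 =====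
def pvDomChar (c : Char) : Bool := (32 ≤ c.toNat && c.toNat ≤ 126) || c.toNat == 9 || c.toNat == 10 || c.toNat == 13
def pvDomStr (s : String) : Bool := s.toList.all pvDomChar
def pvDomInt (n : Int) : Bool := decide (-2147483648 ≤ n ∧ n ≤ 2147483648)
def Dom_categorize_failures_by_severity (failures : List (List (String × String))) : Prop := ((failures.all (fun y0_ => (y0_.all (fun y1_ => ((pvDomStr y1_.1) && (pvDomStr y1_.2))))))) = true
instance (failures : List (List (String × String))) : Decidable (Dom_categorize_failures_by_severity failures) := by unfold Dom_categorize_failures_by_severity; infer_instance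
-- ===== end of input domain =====

-- B replaces A's single mutate-a-dict dispatch loop with four per-category filter passes (objective: simpler).

-- ===== PORT A =====
-- literal port of A: a dict with the four empty buckets, then one pass appending each
-- failure to the bucket named by its severity (default 'low') if that name is a key.
def categorize_failures_by_severity (failures : List (List (String × String))) : List (String × List (List (String × String))) :=
  (failures.foldl
    (fun cats failure =>
      let severity := (PySem.Dict.mk failure).getD "severity" "low"
      if cats.contains severity then cats.modify severity [] (fun l => l ++ [failure]) else cats)
    (PySem.Dict.mk [("critical", []), ("high", []), ("medium", []), ("low", [])])).items

-- ===== PORT B =====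
def categorize_failures_by_severity_alt (failures : List (List (String × String))) : List (String × List (List (String × String))) :=
  (["critical", "high", "medium", "low"]).map
    (fun cat => (cat, failures.filter (fun f => (PySem.Dict.mk f).getD "severity" "low" == cat)))

-- ===== PRECONDITION & SPEC =====
def Spec_categorize_failures_by_severity (failures : List (List (String × String))) (out : List (String × List (List (String × String)))) : Prop := out = categorize_failures_by_severity_alt failures
instance (failures : List (List (String × String))) (out : List (String × List (List (String × String)))) : Decidable (Spec_categorize_failures_by_severity failures out) := by unfold Spec_categorize_failures_by_severity; infer_instance

-- ===== CLAIM (what is proved, stated in full; the proofs are below) =====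
def Claim_equal_categorize_failures_by_severity : Prop := ∀ (failures : List (List (String × String))), Dom_categorize_failures_by_severity failures → Spec_categorize_failures_by_severity failures (categorize_failures_by_severity failures)

-- ===== LEMMAS AND PROOFS =====

-- proof-side name for A's loop body (definitionally equal to the lambda in the port)
def pvStep (cats : PySem.Dict String (List (List (String × String))))
    (failure : List (String × String)) : PySem.Dict String (List (List (String × String))) :=
  let severity := (PySem.Dict.mk failure).getD "severity" "low"
  if cats.contains severity then cats.modify severity [] (fun l => l ++ [failure]) else cats

-- proof-side name for the severity key of a failure
def pvSev (f : List (String × String)) : String := (PySem.Dict.mk f).getD "severity" "low"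

theorem pvStep_literal (a b c d : List (List (String × String))) (f : List (String × String)) :
    pvStep (PySem.Dict.mk [("critical", a), ("high", b), ("medium", c), ("low", d)]) f =
    PySem.Dict.mk [("critical", if pvSev f = "critical" then a ++ [f] else a),
                   ("high",     if pvSev f = "high"     then b ++ [f] else b),
                   ("medium",   if pvSev f = "medium"   then c ++ [f] else c),
                   ("low",      if pvSev f = "low"      then d ++ [f] else d)] := by
  simp only [pvStep]
  rw [show (PySem.Dict.mk f).getD "severity" "low" = pvSev f from rfl]
  generalize pvSev f = s
  by_cases h1 : s = "critical"
  · subst h1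
    simp [PySem.Dict.contains, PySem.Dict.modify, PySem.Dict.get?, PySem.Dict.getD,
      PySem.Dict.insert]
  · by_cases h2 : s = "high"
    · subst h2
      simp [PySem.Dict.contains, PySem.Dict.modify, PySem.Dict.get?, PySem.Dict.getD,
        PySem.Dict.insert]
    · by_cases h3 : s = "medium"
      · subst h3
        simp [PySem.Dict.contains, PySem.Dict.modify, PySem.Dict.get?, PySem.Dict.getD,
          PySem.Dict.insert]
      · by_cases h4 : s = "low"
        · subst h4
          simp [PySem.Dict.contains, PySem.Dict.modify, PySem.Dict.get?, PySem.Dict.getD,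
            PySem.Dict.insert]
        · simp [PySem.Dict.contains, h1, h2, h3, h4, Ne.symm h1, Ne.symm h2, Ne.symm h3, Ne.symm h4]

-- loop invariant: starting from the 4-bucket dict with contents a b c d, A's fold
-- appends to each bucket exactly the failures whose severity matches its name.
theorem categorize_loop_invariant (fs : List (List (String × String)))
    (a b c d : List (List (String × String))) :
    (fs.foldl pvStep
      (PySem.Dict.mk [("critical", a), ("high", b), ("medium", c), ("low", d)])).items =
    [("critical", a ++ fs.filter (fun f => pvSev f == "critical")),
     ("high",     b ++ fs.filter (fun f => pvSev f == "high")),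
     ("medium",   c ++ fs.filter (fun f => pvSev f == "medium")),
     ("low",      d ++ fs.filter (fun f => pvSev f == "low"))] := by
  induction fs generalizing a b c d with
  | nil => simp
  | cons f rest ih =>
    rw [List.foldl_cons, pvStep_literal, ih]
    simp only [List.filter_cons]
    split_ifs with h1 h2 h3 h4 <;> simp_all

-- ===== VERDICT (by name: the statement is the Claim_ definition above) =====
theorem categorize_failures_by_severity_spec : Claim_equal_categorize_failures_by_severity := by
  intro failures _
  show (failures.foldl pvStep
      (PySem.Dict.mk [("critical", []), ("high", []), ("medium", []), ("low", [])])).items =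
    categorize_failures_by_severity_alt failures
  rw [categorize_loop_invariant]
  simp [categorize_failures_by_severity_alt, pvSev]
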